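-- pv_equiv track=rewrite | github.com/A-blackfish/Ellipse_area | code/IntersectPoint_main.py | dis_point
-- ===== SOURCE A (Python) =====
-- def dis_point(m):
-- 	up = []
-- 	down = []
-- 	for i in range(4):
-- 		if m[i][1]>0 and len(up)<2:
-- 			up.append(m[i])
-- 		else:
-- 			down.append(m[i])
-- 	return up,down
-- ===== SOURCE B (Python) =====
-- def dis_point(m):
-- 	pos = [i for i in range(4) if m[i][1] > 0]
-- 	chosen = set(pos[:2])
-- 	up = [m[i] for i in range(4) if i in chosen]
-- 	down = [m[i] for i in range(4) if i not in chosen]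
-- 	return up, down
-- ===== Notes on version B (the rewrite author's own statement) =====
-- stated objective: alternative
-- what changed: Replaces the single stateful accumulation loop with its len(up)<2 guard by an index-selection-then-filter decomposition: first compute the indices with positive y, cap at two, then filter the four points into up/down by membership in that index set.
import Mathlib
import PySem

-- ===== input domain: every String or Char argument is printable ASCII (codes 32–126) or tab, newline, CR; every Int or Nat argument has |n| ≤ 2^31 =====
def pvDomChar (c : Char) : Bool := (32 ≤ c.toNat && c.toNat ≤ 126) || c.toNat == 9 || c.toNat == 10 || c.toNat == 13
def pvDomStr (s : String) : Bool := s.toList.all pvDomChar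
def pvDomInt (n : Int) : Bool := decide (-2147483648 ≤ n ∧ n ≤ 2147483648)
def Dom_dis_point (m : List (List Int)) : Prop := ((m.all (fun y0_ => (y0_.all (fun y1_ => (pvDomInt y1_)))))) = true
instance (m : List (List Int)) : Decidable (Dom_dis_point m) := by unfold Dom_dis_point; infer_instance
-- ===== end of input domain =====

-- B replaces A's stateful accumulation loop (with its len(up)<2 cap) by an
-- index-selection-then-filter decomposition; objective: alternative (same cost).


-- ===== PORT A =====
-- m[i] and m[i][1]; on Pre_ these indices are in range, .getD [] / .getD 0 is never taken
def pvRow (m : List (List Int)) (i : Int) : List Int := (PySem.List.pyGet? m i).getD []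
def pvY (m : List (List Int)) (i : Int) : Int := (PySem.List.pyGet? (pvRow m i) 1).getD 0

def dis_point (m : List (List Int)) : List (List Int) × List (List Int) :=
  (PySem.List.pyRange 0 4 1).foldl
    (fun (s : List (List Int) × List (List Int)) i =>
      if pvY m i > 0 ∧ s.1.length < 2 then (s.1 ++ [pvRow m i], s.2)
      else (s.1, s.2 ++ [pvRow m i]))
    ([], [])

-- ===== PORT B =====
def dis_point_alt (m : List (List Int)) : List (List Int) × List (List Int) :=
  let pos := (PySem.List.pyRange 0 4 1).filter (fun i => pvY m i > 0)
  let chosen := PySem.Set.ofList (pos.take 2)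
  let up := ((PySem.List.pyRange 0 4 1).filter (fun i => i ∈ chosen)).map (pvRow m)
  let down := ((PySem.List.pyRange 0 4 1).filter (fun i => ¬ i ∈ chosen)).map (pvRow m)
  (up, down)

-- ===== PRECONDITION & SPEC =====
-- Pre_: Python A raises IndexError unless m has at least 4 rows and each of the
-- first four rows has at least 2 entries.
def Pre_dis_point (m : List (List Int)) : Prop :=
  4 ≤ m.length ∧ ∀ r ∈ m.take 4, 2 ≤ r.length
instance (m : List (List Int)) : Decidable (Pre_dis_point m) := by unfold Pre_dis_point; infer_instance

def pvWitness_dis_point : List (List Int) := [[0, 1], [0, -1], [2, 3], [1, 1]]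

def Spec_dis_point (m : List (List Int)) (out : List (List Int) × List (List Int)) : Prop := out = dis_point_alt m
instance (m : List (List Int)) (out : List (List Int) × List (List Int)) : Decidable (Spec_dis_point m out) := by unfold Spec_dis_point; infer_instance

-- ===== CLAIM (what is proved, stated in full; the proofs are below) =====
def Claim_equal_dis_point : Prop := ∀ (m : List (List Int)), Dom_dis_point m → Pre_dis_point m → Spec_dis_point m (dis_point m)

-- ===== LEMMAS AND PROOFS =====
theorem pyRange04 : PySem.List.pyRange 0 4 1 = [0, 1, 2, 3] := by decide

-- ===== VERDICT (by name: the statement is the Claim_ definition above) =====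
theorem dis_point_spec : Claim_equal_dis_point := by
  intro m _ _
  unfold Spec_dis_point dis_point dis_point_alt
  rw [pyRange04]
  by_cases h0 : pvY m 0 > 0 <;> by_cases h1 : pvY m 1 > 0 <;>
    by_cases h2 : pvY m 2 > 0 <;> by_cases h3 : pvY m 3 > 0 <;>
    simp [h0, h1, h2, h3, List.foldl, List.filter, PySem.Set.ofList, PySem.Set.add, List.take]
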